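-- pv_equiv track=rewrite | github.com/andrewdcampbell/Miscellaneous | smallest_subseq.py | recursiveSSK
-- ===== SOURCE A (Python) =====
-- def recursiveSSK(s, k, i=0):
--     """
--     A recursive variant of the iterative version.
--     Run-time: O(n) (assuming list slicing and concatenation is constant time).
--     """
--     n = len(s)
--     if i == n - 1 or n == k:
--         return s[:k]
--     if s[i] > s[i + 1]:
--         return recursiveSSK(s[:i]+s[i+1:], k, max(i - 1, 0))
--     else:
--         return recursiveSSK(s, k, i + 1)
-- ===== SOURCE B (Python) =====
-- def recursiveSSK(s, k, i=0):
--     """Monotonic-stack greedy with removal budget len(s)-k: one left-to-right pass."""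
--     n = len(s)
--     if n == 0:
--         return s[:k]
--     limit = n - k
--     stack = list(s[:i + 1])
--     removed = 0
--     rest = s[i + 1:]
--     for j, c in enumerate(rest):
--         while stack and removed != limit and stack[-1] > c:
--             stack.pop()
--             removed += 1
--         if removed == limit:
--             return ''.join(stack) + rest[j:]
--         stack.append(c)
--     return ''.join(stack)[:k]
-- ===== Notes on version B (the rewrite author's own statement) =====
-- stated objective: faster
-- what changed: Replaces A's recursion that deletes one character at a time by slicing and concatenating the whole string and restarts near the deletion point with a single left-to-right monotonic-stack pass carrying a removal budget len(s)-k.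
-- outside the precondition, e.g. on recursiveSSK('ab', 3, -1): A returns 'aab', B returns 'ab'; on recursiveSSK('abb', 2, -1): A returns 'aa', B returns 'ab'
import Mathlib
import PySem

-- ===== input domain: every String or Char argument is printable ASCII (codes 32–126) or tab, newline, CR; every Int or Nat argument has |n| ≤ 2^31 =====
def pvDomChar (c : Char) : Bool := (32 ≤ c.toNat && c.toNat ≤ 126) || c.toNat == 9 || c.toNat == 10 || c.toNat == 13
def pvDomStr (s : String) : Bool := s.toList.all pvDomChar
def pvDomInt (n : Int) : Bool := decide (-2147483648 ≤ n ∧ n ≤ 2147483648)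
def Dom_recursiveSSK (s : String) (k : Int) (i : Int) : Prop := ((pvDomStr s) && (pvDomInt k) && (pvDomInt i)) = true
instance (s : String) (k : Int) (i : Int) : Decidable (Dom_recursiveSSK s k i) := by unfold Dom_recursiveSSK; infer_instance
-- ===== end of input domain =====

-- B replaces A's delete-one-char-and-restart recursion (string rebuilt by slicing at every
-- removal) with a single monotonic-stack pass carrying a removal budget len(s)-k (faster).


-- ===== PORT A =====
-- A's recursion, step for step, on List Char; the Nat fuel only makes the recursion total
-- (inside Pre_ the measure 2*len - i bounds the number of calls, so the fuel is never exhausted);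
-- the `| _, _ => []` arm is Python's IndexError at s[i]/s[i+1] (outside Pre_).
def goA : Nat → List Char → Int → Int → List Char
  | 0, _, _, _ => []
  | fuel+1, l, k, i =>
    let n : Int := l.length
    if i = n - 1 ∨ n = k then PySem.List.slice l none (some k)
    else
      match PySem.List.pyGet? l i, PySem.List.pyGet? l (i+1) with
      | some a, some b =>
          if b < a then
            goA fuel (PySem.List.slice l none (some i) ++ PySem.List.slice l (some (i+1)) none)
              k (max (i-1) 0)
          else goA fuel l k (i+1)
      | _, _ => []

def recursiveSSK (s : String) (k : Int) (i : Int) : String :=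
  String.mk (goA (2 * s.toList.length + 2) s.toList k i)

-- ===== PORT B =====
-- stack is kept top-first (head = Python's stack[-1]); reversed back where Source B joins it.
-- `while stack and removed != limit and stack[-1] > c: stack.pop(); removed += 1`
def popLoop : List Char → Char → Int → Int → List Char × Int
  | [], _, r, _ => ([], r)
  | t :: st, c, r, lim => if r ≠ lim ∧ c < t then popLoop st c (r+1) lim else (t :: st, r)

-- `for j, c in enumerate(rest): … return ''.join(stack) + rest[j:] … stack.append(c)`
def goB : List Char → List Char → Int → Int → Int → List Char
  | st, [], _, _, k => PySem.List.slice st.reverse none (some k)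
  | st, c :: rest, r, lim, k =>
    match popLoop st c r lim with
    | (st', r') => if r' = lim then st'.reverse ++ c :: rest else goB (c :: st') rest r' lim k

def recursiveSSK_alt (s : String) (k : Int) (i : Int) : String :=
  let l := s.toList
  if l.length = 0 then String.mk (PySem.List.slice l none (some k))
  else
    String.mk (goB (PySem.List.slice l none (some (i+1))).reverse
      (PySem.List.slice l (some (i+1)) none) 0 ((l.length : Int) - k) k)

-- ===== PRECONDITION & SPEC =====
-- Pre_ excludes: negative i (i is the recursion's internal pointer, natural domain 0 ≤ i:
-- A wraps a negative i as a Python index and can then return strings that are not even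
-- subsequences of s, e.g. with a duplicated prefix), and i ≥ len(s) with len(s) ≠ k, where
-- A raises IndexError at s[i].
def Pre_recursiveSSK (s : String) (k : Int) (i : Int) : Prop :=
  0 ≤ i ∧ (i < (s.toList.length : Int) ∨ (s.toList.length : Int) = k)
instance (s : String) (k : Int) (i : Int) : Decidable (Pre_recursiveSSK s k i) := by
  unfold Pre_recursiveSSK; infer_instance

def pvWitness_recursiveSSK : String × Int × Int := ("cbad", 2, 0)

def Spec_recursiveSSK (s : String) (k : Int) (i : Int) (out : String) : Prop := out = recursiveSSK_alt s k i
instance (s : String) (k : Int) (i : Int) (out : String) : Decidable (Spec_recursiveSSK s k i out) := by unfold Spec_recursiveSSK; infer_instance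

-- ===== CLAIM (what is proved, stated in full; the proofs are below) =====
def Claim_equal_recursiveSSK : Prop := ∀ (s : String) (k : Int) (i : Int), Dom_recursiveSSK s k i → Pre_recursiveSSK s k i → Spec_recursiveSSK s k i (recursiveSSK s k i)


-- ===== LEMMAS AND PROOFS =====\n
set_option maxHeartbeats 1000000

-- one fired pop of Source B's inner while-loop, seen from goB
lemma goB_pop (t : Char) (st₂ : List Char) (c : Char) (rest : List Char) (r lim k : Int)
    (h1 : r ≠ lim) (h2 : c < t) :
    goB (t :: st₂) (c :: rest) r lim k = goB st₂ (c :: rest) (r+1) lim k := by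
  simp [goB, popLoop, h1, h2]

-- unfolding equation for one step of A's recursion
lemma goA_succ (f : Nat) (l : List Char) (k i : Int) :
    goA (f+1) l k i =
      if i = (l.length : Int) - 1 ∨ (l.length : Int) = k then PySem.List.slice l none (some k)
      else
        match PySem.List.pyGet? l i, PySem.List.pyGet? l (i+1) with
        | some a, some b =>
            if b < a then
              goA f (PySem.List.slice l none (some i) ++ PySem.List.slice l (some (i+1)) none)
                k (max (i-1) 0)
            else goA f l k (i+1)
        | _, _ => [] := rfl

-- simulation invariant: A's state (stack.reverse ++ rest, |stack|-1) is B's state (stack, rest);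
-- lim - r = current length - k, k ≤ current length, and the fuel dominates the measure |st|+2|rest|+1
lemma main_sim (fuel : Nat) : ∀ (st rest : List Char) (r lim k : Int),
    st ≠ [] →
    lim - r = (st.length : Int) + rest.length - k →
    st.length + 2 * rest.length + 1 < fuel →
    goA fuel (st.reverse ++ rest) k ((st.length : Int) - 1) = goB st rest r lim k := by
  induction fuel with
  | zero => intro st rest r lim k hne hlim hf; omega
  | succ f ih =>
    intro st rest r lim k hne hlim hf
    obtain ⟨t, st₂, rfl⟩ : ∃ t st₂, st = t :: st₂ := by
      cases st with | nil => exact absurd rfl hne | cons a b => exact ⟨a, b, rfl⟩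
    have hi : (((t :: st₂ : List Char).length : Int) - 1) = ((st₂.length : Nat) : Int) := by
      simp
    have hl : (t :: st₂ : List Char).reverse ++ rest = st₂.reverse ++ t :: rest := by simp
    rw [hi, hl]
    cases rest with
    | nil =>
      rw [goA_succ, if_pos (Or.inl (by simp))]
      have hB : goB (t :: st₂) [] r lim k = PySem.List.slice (t :: st₂ : List Char).reverse none (some k) := rfl
      rw [hB]
      simp
    | cons c rest' =>
      have hnl : ((st₂.reverse ++ t :: c :: rest').length : Int) = (st₂.length : Int) + 2 + rest'.length := by
        simp; ring
      simp only [List.length_cons] at hlim hf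
      push_cast at hlim
      by_cases hkn : (st₂.length : Int) + 2 + rest'.length = k
      · -- current length equals k: A returns the whole current string; B's budget is exhausted
        have hr : r = lim := by omega
        rw [goA_succ, if_pos (Or.inr (by rw [hnl]; omega))]
        have hkc : k = (((st₂.reverse ++ t :: c :: rest').length : Nat) : Int) := by
          rw [hnl]; omega
        rw [hkc, PySem.List.slice_to_natCast, List.take_length]
        simp [goB, popLoop, hr]
      · have hrlt : r ≠ lim := by omega
        rw [goA_succ, if_neg (by rw [hnl]; intro h; rcases h with h | h <;> omega)]
        have hg1 : PySem.List.pyGet? (st₂.reverse ++ t :: c :: rest') ((st₂.length : Nat) : Int) = some t := by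
          rw [PySem.List.pyGet?_natCast]; simp
        have hg2 : PySem.List.pyGet? (st₂.reverse ++ t :: c :: rest') (((st₂.length : Nat) : Int) + 1) = some c := by
          rw [show (((st₂.length : Nat) : Int) + 1) = ((st₂.length + 1 : Nat) : Int) by push_cast; ring,
            PySem.List.pyGet?_natCast]
          simp
        by_cases hct : c < t
        · -- pop: A deletes s[i] and steps back one; B pops the stack top
          simp only [hg1, hg2, if_pos hct]
          have hs1 : PySem.List.slice (st₂.reverse ++ t :: c :: rest') none (some ((st₂.length : Nat) : Int)) = st₂.reverse := by
            rw [PySem.List.slice_to_natCast]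
            exact List.take_left' (by simp)
          have hs2 : PySem.List.slice (st₂.reverse ++ t :: c :: rest') (some (((st₂.length : Nat) : Int) + 1)) none = c :: rest' := by
            rw [show (((st₂.length : Nat) : Int) + 1) = ((st₂.length + 1 : Nat) : Int) by push_cast; ring,
              PySem.List.slice_from_natCast]
            rw [show (st₂.reverse ++ t :: c :: rest') = (st₂.reverse ++ [t]) ++ c :: rest' by simp]
            exact List.drop_left' (by simp)
          rw [hs1, hs2, goB_pop t st₂ c rest' r lim k hrlt hct]
          cases st₂ with
          | nil =>
            -- the stack ran empty: A is now at position 0 of the shortened string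
            simp only [List.length_nil, List.reverse_nil, List.nil_append, Nat.cast_zero] at hlim hf ⊢
            rw [show (max ((0:Int) - 1) 0) = 0 from by omega]
            have hgoB : goB ([] : List Char) (c :: rest') (r+1) lim k =
                if r + 1 = lim then c :: rest' else goB [c] rest' (r+1) lim k := by
              simp [goB, popLoop]
            rw [hgoB]
            by_cases hrl : r + 1 = lim
            · rw [if_pos hrl]
              obtain ⟨f', rfl⟩ : ∃ f', f = f' + 1 := by
                cases f with
                | zero => exfalso; omega
                | succ f' => exact ⟨f', rfl⟩
              rw [goA_succ, if_pos (Or.inr (by simp only [List.length_cons]; push_cast; omega))]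
              rw [show k = (((c :: rest').length : Nat) : Int) from by
                    simp only [List.length_cons]; push_cast; omega,
                PySem.List.slice_to_natCast, List.take_length]
            · rw [if_neg hrl]
              have h2 := ih [c] rest' (r+1) lim k (by simp)
                (by simp only [List.length_cons, List.length_nil]; push_cast; omega)
                (by simp only [List.length_cons, List.length_nil]; omega)
              rw [show (([c] : List Char).reverse ++ rest') = c :: rest' from by simp,
                show (((([c] : List Char).length : Nat) : Int) - 1) = 0 from by simp] at h2
              exact h2
          | cons t₂ st₃ =>
            rw [show (max ((((t₂ :: st₃ : List Char).length : Nat) : Int) - 1) 0) =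
                  (((t₂ :: st₃ : List Char).length : Nat) : Int) - 1 from by
              simp only [List.length_cons]; push_cast; omega]
            exact ih (t₂ :: st₃) (c :: rest') (r+1) lim k (by simp)
              (by simp only [List.length_cons] at hlim ⊢; push_cast at hlim ⊢; omega)
              (by simp only [List.length_cons] at hf ⊢; omega)
        · -- push: A advances i; B pushes c onto the stack
          simp only [hg1, hg2, if_neg hct]
          have hnp : ¬ (r ≠ lim ∧ c < t) := by intro h; exact hct h.2
          have hgoB : goB (t :: st₂) (c :: rest') r lim k = goB (c :: t :: st₂) rest' r lim k := by
            simp [goB, popLoop, hnp]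
            intro h; omega
          rw [hgoB]
          have h2 := ih (c :: t :: st₂) rest' r lim k (by simp)
            (by simp only [List.length_cons] at hlim ⊢; push_cast at hlim ⊢; omega)
            (by simp only [List.length_cons] at hf ⊢; omega)
          rw [show ((c :: t :: st₂ : List Char).reverse ++ rest') = st₂.reverse ++ t :: c :: rest' from by simp,
            show ((((c :: t :: st₂ : List Char).length : Nat) : Int) - 1) = ((st₂.length : Nat) : Int) + 1 from by
              simp only [List.length_cons]; push_cast; ring] at h2
          exact h2

theorem recursiveSSK_spec : Claim_equal_recursiveSSK := by
  unfold Claim_equal_recursiveSSK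
  intro s k i _ hpre
  unfold Spec_recursiveSSK Pre_recursiveSSK at *
  obtain ⟨hi0, hin⟩ := hpre
  unfold recursiveSSK recursiveSSK_alt
  by_cases hl0 : s.toList.length = 0
  · -- empty string: Pre_ forces k = 0, both sides return ""
    have hnil : s.toList = [] := List.eq_nil_of_length_eq_zero hl0
    have hk0 : k = 0 := by rcases hin with h | h <;> omega
    have hs0 : PySem.List.slice ([] : List Char) none (some (0:Int)) = [] := by
      rw [show (0:Int) = ((0:Nat):Int) from by simp, PySem.List.slice_to_natCast]
      simp
    have hA : goA (2 * ([] : List Char).length + 2) [] 0 i = [] := by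
      rw [show 2 * ([] : List Char).length + 2 = 1 + 1 from by simp, goA_succ,
        if_pos (Or.inr (by simp)), hs0]
    rw [hnil, hk0, hA, if_pos (show ([] : List Char).length = 0 from rfl), hs0]
  · simp only [if_neg hl0]
    by_cases hilt : i < (s.toList.length : Int)
    · -- the in-range case: run the simulation from stack = s[:i+1], rest = s[i+1:]
      rw [show i + 1 = ((i.toNat + 1 : Nat) : Int) from by push_cast; omega,
        PySem.List.slice_to_natCast, PySem.List.slice_from_natCast]
      have hstlen : (s.toList.take (i.toNat + 1)).length = i.toNat + 1 := by
        rw [List.length_take]; omega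
      have h2 := main_sim (2 * s.toList.length + 2) (s.toList.take (i.toNat + 1)).reverse
        (s.toList.drop (i.toNat + 1)) 0 ((s.toList.length : Int) - k) k
        (by intro h; apply_fun List.length at h
            rw [List.length_reverse, hstlen] at h; simp at h)
        (by rw [List.length_reverse, hstlen, List.length_drop]; push_cast; omega)
        (by rw [List.length_reverse, hstlen, List.length_drop]; omega)
      rw [List.reverse_reverse, List.take_append_drop] at h2
      rw [show (((s.toList.take (i.toNat + 1)).reverse.length : Nat) : Int) - 1 = i from by
        rw [List.length_reverse, hstlen]; push_cast; omega] at h2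
      rw [h2]
    · -- i ≥ len(s): Pre_ forces len(s) = k, both sides return the whole string
      have hkl : (s.toList.length : Int) = k := hin.resolve_left hilt
      rw [show i + 1 = (((i+1).toNat : Nat) : Int) from by omega,
        PySem.List.slice_to_natCast, PySem.List.slice_from_natCast]
      have htk : s.toList.take (i+1).toNat = s.toList := List.take_of_length_le (by omega)
      have hdr : s.toList.drop (i+1).toNat = [] := List.drop_eq_nil_of_le (by omega)
      rw [htk, hdr]
      have hB : goB s.toList.reverse [] 0 ((s.toList.length : Int) - k) k =
          PySem.List.slice s.toList.reverse.reverse none (some k) := rfl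
      rw [hB, List.reverse_reverse,
        show 2 * s.toList.length + 2 = (2 * s.toList.length + 1) + 1 from by omega,
        goA_succ, if_pos (Or.inr hkl)]
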